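-- pv_equiv track=rewrite | github.com/cybertronai/ByteDMD-definition | experiments/grid/algorithms.py | make_filter
-- ===== SOURCE A (Python) =====
-- def make_filter(k_rows: int, k_cols: int, in_channels: int, out_channels: int, offset: int = 0) -> list[list[list[list[int]]]]:
--     return [
--         [
--             [
--                 [
--                     offset
--                     + ((((u * k_cols + v) * in_channels + ci) * out_channels + co) + 1)
--                     for co in range(out_channels)
--                 ]
--                 for ci in range(in_channels)
--             ]
--             for v in range(k_cols)
--         ]
--         for u in range(k_rows)
--     ]
-- ===== SOURCE B (Python) =====
-- def make_filter(k_rows: int, k_cols: int, in_channels: int, out_channels: int, offset: int = 0) -> list[list[list[list[int]]]]: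
--     # build the flat run of consecutive integers, then reshape it by repeated chunking;
--     # a nonpositive dimension counts as zero (it contributes no elements)
--     def chunk(xs, n, size):
--         return [xs[i * size:(i + 1) * size] for i in range(n)]
--     kr = max(0, k_rows)
--     kc = max(0, k_cols)
--     ic = max(0, in_channels)
--     oc = max(0, out_channels)
--     flat = list(range(offset + 1, offset + kr * kc * ic * oc + 1))
--     return [
--         [chunk(b2, ic, oc) for b2 in chunk(b1, kc, ic * oc)]
--         for b1 in chunk(flat, kr, kc * ic * oc)
--     ]
-- ===== Notes on version B (the rewrite author's own statement) =====
-- stated objective: alternative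
-- what changed: B builds one flat list of the consecutive integers and reshapes it into the 4D structure by repeated contiguous chunking (slicing), instead of A's nested comprehensions computing each element from a closed-form 4-index formula.
import Mathlib
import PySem

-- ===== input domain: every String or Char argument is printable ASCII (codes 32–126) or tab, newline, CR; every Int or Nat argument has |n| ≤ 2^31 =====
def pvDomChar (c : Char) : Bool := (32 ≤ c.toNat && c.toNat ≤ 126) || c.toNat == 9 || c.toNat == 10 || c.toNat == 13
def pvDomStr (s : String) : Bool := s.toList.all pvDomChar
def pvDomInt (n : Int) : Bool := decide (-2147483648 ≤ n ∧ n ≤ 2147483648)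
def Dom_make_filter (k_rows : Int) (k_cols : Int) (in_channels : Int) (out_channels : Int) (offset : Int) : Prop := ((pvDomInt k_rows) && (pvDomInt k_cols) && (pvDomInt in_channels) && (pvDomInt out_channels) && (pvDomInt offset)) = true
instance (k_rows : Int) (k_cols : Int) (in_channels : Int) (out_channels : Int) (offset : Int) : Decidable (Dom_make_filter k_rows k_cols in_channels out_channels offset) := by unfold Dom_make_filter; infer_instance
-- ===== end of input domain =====

-- B replaces A's per-element closed-form index computation by building one flat run of
-- consecutive integers and reshaping it by repeated contiguous chunking (objective: alternative).

-- ===== PORT A =====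
def make_filter (k_rows : Int) (k_cols : Int) (in_channels : Int) (out_channels : Int) (offset : Int) : List (List (List (List Int))) :=
  (PySem.List.pyRange 0 k_rows 1).map (fun u =>
    (PySem.List.pyRange 0 k_cols 1).map (fun v =>
      (PySem.List.pyRange 0 in_channels 1).map (fun ci =>
        (PySem.List.pyRange 0 out_channels 1).map (fun co =>
          offset + ((((u * k_cols + v) * in_channels + ci) * out_channels + co) + 1)))))

-- ===== PORT B =====
-- Source B's chunk helper: [xs[i*size:(i+1)*size] for i in range(n)]
def pvChunk {α : Type} (xs : List α) (n : Int) (size : Int) : List (List α) :=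
  (PySem.List.pyRange 0 n 1).map
    (fun i => PySem.List.slice xs (some (i * size)) (some ((i + 1) * size)))

def make_filter_alt (k_rows : Int) (k_cols : Int) (in_channels : Int) (out_channels : Int) (offset : Int) : List (List (List (List Int))) :=
  let kr := max 0 k_rows
  let kc := max 0 k_cols
  let ic := max 0 in_channels
  let oc := max 0 out_channels
  let flat := PySem.List.pyRange (offset + 1) (offset + kr * kc * ic * oc + 1) 1
  (pvChunk flat kr (kc * ic * oc)).map (fun b1 =>
    (pvChunk b1 kc (ic * oc)).map (fun b2 =>
      pvChunk b2 ic oc))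

-- ===== PRECONDITION & SPEC =====
def Spec_make_filter (k_rows : Int) (k_cols : Int) (in_channels : Int) (out_channels : Int) (offset : Int) (out : List (List (List (List Int)))) : Prop := out = make_filter_alt k_rows k_cols in_channels out_channels offset
instance (k_rows : Int) (k_cols : Int) (in_channels : Int) (out_channels : Int) (offset : Int) (out : List (List (List (List Int)))) : Decidable (Spec_make_filter k_rows k_cols in_channels out_channels offset out) := by unfold Spec_make_filter; infer_instance

-- ===== CLAIM (what is proved, stated in full; the proofs are below) =====
def Claim_equal_make_filter : Prop := ∀ (k_rows : Int) (k_cols : Int) (in_channels : Int) (out_channels : Int) (offset : Int), Dom_make_filter k_rows k_cols in_channels out_channels offset → Spec_make_filter k_rows k_cols in_channels out_channels offset (make_filter k_rows k_cols in_channels out_channels offset)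

-- ===== LEMMAS AND PROOFS =====

theorem pv_slice_nil {α : Type} (a b : Int) :
    PySem.List.slice ([] : List α) (some a) (some b) = [] := by
  simp [PySem.List.slice]

theorem pv_length_pvChunk {α : Type} (xs : List α) (n size : Int) :
    (pvChunk xs n size).length = (n : Int).toNat := by
  simp [pvChunk, PySem.List.length_pyRange_one]

-- a contiguous in-bounds slice of a step-1 range is again a step-1 range
theorem pv_slice_pyRange (a b lo hi : Int) (h0 : 0 ≤ lo) (h1 : lo ≤ hi) (h2 : a + hi ≤ b) :
    PySem.List.slice (PySem.List.pyRange a b 1) (some lo) (some hi)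
      = PySem.List.pyRange (a + lo) (a + hi) 1 := by
  rw [PySem.List.slice_toNat _ h0 (le_trans h0 h1)]
  apply List.ext_getElem
  · simp [PySem.List.length_pyRange_one]
    omega
  · intro k hk1 hk2
    have hlen : (PySem.List.pyRange a b 1).length = (b - a).toNat :=
      PySem.List.length_pyRange_one a b
    rw [List.getElem_take, List.getElem_drop]
    rw [PySem.List.getElem_pyRange_one, PySem.List.getElem_pyRange_one]
    push_cast
    omega

-- shifting a zero-based range
theorem pv_pyRange_shift (c m : Int) :
    PySem.List.pyRange c (c + m) 1 = (PySem.List.pyRange 0 m 1).map (fun x => c + x) := by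
  rw [PySem.List.pyRange_one, PySem.List.pyRange_one]
  have h : c + m - c = m := by ring
  simp [h, List.map_map, Function.comp]

-- chunking a step-1 range of length n*size into n blocks of size 'size'
theorem pv_pvChunk_pyRange (a n s : Int) (hs : 0 ≤ s) :
    pvChunk (PySem.List.pyRange a (a + n * s) 1) n s
      = (PySem.List.pyRange 0 n 1).map
          (fun i => PySem.List.pyRange (a + i * s) (a + (i + 1) * s) 1) := by
  unfold pvChunk
  apply List.map_congr_left
  intro i hi
  have hmem := PySem.List.mem_pyRange_one.mp hi
  have h2 : a + (i + 1) * s ≤ a + n * s := by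
    have : (i + 1) * s ≤ n * s := by
      apply mul_le_mul_of_nonneg_right _ hs; omega
    omega
  rw [pv_slice_pyRange a (a + n * s) (i * s) ((i + 1) * s)
      (mul_nonneg hmem.1 hs) (by nlinarith [hmem.1, hmem.2]) h2]

-- both sides collapse to a constant map when a dimension is nonpositive
theorem pv_map_const_eq {α β γ : Type} (xs : List α) (ys : List β) (c : γ)
    (h : xs.length = ys.length) :
    xs.map (fun _ => c) = ys.map (fun _ => c) := by
  rw [List.map_const', List.map_const', h]

-- ===== VERDICT (by name: the statement is the Claim_ definition above) =====
theorem make_filter_spec : Claim_equal_make_filter := by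
  intro kr kc ic oc off _
  simp only [Spec_make_filter, make_filter, make_filter_alt]
  by_cases hkr : kr ≤ 0
  · have h : max 0 kr = 0 := by omega
    simp [pvChunk, h, PySem.List.pyRange_one_eq_nil hkr,
      PySem.List.pyRange_one_eq_nil (le_refl (0 : Int))]
  push_neg at hkr
  have hkr' : max 0 kr = kr := by omega
  by_cases hkc : kc ≤ 0
  · have h : max 0 kc = 0 := by omega
    have hA : ∀ u : Int, (PySem.List.pyRange 0 kc 1).map (fun v =>
        (PySem.List.pyRange 0 ic 1).map (fun ci =>
          (PySem.List.pyRange 0 oc 1).map (fun co =>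
            off + ((((u * kc + v) * ic + ci) * oc + co) + 1)))) = [] := by
      intro u; simp [PySem.List.pyRange_one_eq_nil hkc]
    simp only [h, hkr', hA]
    have hB : ∀ b1 : List Int,
        (pvChunk b1 0 ((max 0 ic) * (max 0 oc))).map
          (fun b2 => pvChunk b2 (max 0 ic) (max 0 oc)) = [] := by
      intro b1
      simp [pvChunk, PySem.List.pyRange_one_eq_nil (le_refl (0 : Int))]
    simp only [hB]
    exact pv_map_const_eq _ _ _ (by
      rw [pv_length_pvChunk, PySem.List.length_pyRange_one]; omega)
  push_neg at hkc
  have hkc' : max 0 kc = kc := by omega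
  by_cases hic : ic ≤ 0
  · have h : max 0 ic = 0 := by omega
    have hnil := PySem.List.pyRange_one_eq_nil (a := 0) (b := ic) hic
    have hnil0 := PySem.List.pyRange_one_eq_nil (a := 0) (b := 0) (le_refl (0 : Int))
    have hA : ∀ u v : Int, (PySem.List.pyRange 0 ic 1).map (fun ci =>
        (PySem.List.pyRange 0 oc 1).map (fun co =>
          off + ((((u * kc + v) * ic + ci) * oc + co) + 1))) = [] := by
      intro u v; simp [hnil]
    simp only [h, hkr', hkc', hA]
    have hB : ∀ b2 : List Int, pvChunk b2 0 (max 0 oc) = ([] : List (List Int)) := by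
      intro b2; simp [pvChunk, hnil0]
    simp only [hB]
    simp only [List.map_const', pv_length_pvChunk, PySem.List.length_pyRange_one]
    norm_num
  push_neg at hic
  have hic' : max 0 ic = ic := by omega
  by_cases hoc : oc ≤ 0
  · -- the flat list is empty; every slice of it is empty, and A's innermost range is empty
    have h : max 0 oc = 0 := by omega
    simp only [h, hkr', hkc', hic', mul_zero]
    have hflat : PySem.List.pyRange (off + 1) (off + 0 + 1) 1 = [] :=
      PySem.List.pyRange_one_eq_nil (by omega)
    simp only [hflat]
    have hnilchunk : ∀ (n s : Int), pvChunk ([] : List Int) n s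
        = (PySem.List.pyRange 0 n 1).map (fun _ => ([] : List Int)) := by
      intro n s; unfold pvChunk
      exact List.map_congr_left (fun i _ => pv_slice_nil _ _)
    have hocnil := PySem.List.pyRange_one_eq_nil (a := 0) (b := oc) hoc
    rw [hnilchunk, List.map_map]
    apply List.map_congr_left
    intro u _
    simp only [Function.comp]
    rw [hnilchunk, List.map_map]
    apply List.map_congr_left
    intro v _
    simp only [Function.comp]
    rw [hnilchunk]
    apply List.map_congr_left
    intro ci _
    simp [hocnil]
  push_neg at hoc
  have hoc' : max 0 oc = oc := by omega
  -- main case: all dimensions positive; chunking a range yields subranges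
  simp only [hkr', hkc', hic', hoc']
  have hA0 : off + kr * kc * ic * oc + 1 = (off + 1) + kr * (kc * ic * oc) := by ring
  rw [hA0]
  rw [pv_pvChunk_pyRange _ _ _ (by positivity), List.map_map]
  apply List.map_congr_left
  intro u hu
  simp only [Function.comp]
  have h1 : off + 1 + (u + 1) * (kc * ic * oc)
      = (off + 1 + u * (kc * ic * oc)) + kc * (ic * oc) := by ring
  rw [h1, pv_pvChunk_pyRange _ _ _ (by positivity), List.map_map]
  apply List.map_congr_left
  intro v hv
  simp only [Function.comp]
  have h2 : off + 1 + u * (kc * ic * oc) + (v + 1) * (ic * oc)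
      = (off + 1 + u * (kc * ic * oc) + v * (ic * oc)) + ic * oc := by ring
  rw [h2, pv_pvChunk_pyRange _ _ _ (by omega)]
  apply List.map_congr_left
  intro ci hci
  have h3 : off + 1 + u * (kc * ic * oc) + v * (ic * oc) + (ci + 1) * oc
      = (off + 1 + u * (kc * ic * oc) + v * (ic * oc) + ci * oc) + oc := by ring
  rw [h3, pv_pyRange_shift]
  apply List.map_congr_left
  intro co _
  ring
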